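-- pv_equiv track=rewrite | github.com/ladamalina/leetcode-2020-python | 1291-sequential-digits/main.py | seqOfLen
-- ===== SOURCE A (Python) =====
-- from typing import Generator, List
--
-- def seqOfLen(length: int) -> Generator[int, None, None]:
--     if length < 1 or length > 10:
--         return
--     num = ''
--     for i in range(1, length + 1):
--         num += str(i)
--     diff = int('1' * length)
--     while len(num) == length:
--         yield int(num)
--         if int(num[-1]) == 9:
--             break
--         num = str(int(num) + diff)
--
--     return None
-- ===== SOURCE B (Python) =====
-- def seqOfLen(length):
--     if length < 1:
--         return
--     for start in range(1, 11 - length):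
--         yield int(''.join(str(d) for d in range(start, start + length)))
-- ===== Notes on version B (the rewrite author's own statement) =====
-- stated objective: simpler
-- what changed: B builds each sequential number directly from its starting digit (one bounded range over starts, concatenating consecutive digits) instead of A's repunit-addition while loop over growing string state.
import Mathlib
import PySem

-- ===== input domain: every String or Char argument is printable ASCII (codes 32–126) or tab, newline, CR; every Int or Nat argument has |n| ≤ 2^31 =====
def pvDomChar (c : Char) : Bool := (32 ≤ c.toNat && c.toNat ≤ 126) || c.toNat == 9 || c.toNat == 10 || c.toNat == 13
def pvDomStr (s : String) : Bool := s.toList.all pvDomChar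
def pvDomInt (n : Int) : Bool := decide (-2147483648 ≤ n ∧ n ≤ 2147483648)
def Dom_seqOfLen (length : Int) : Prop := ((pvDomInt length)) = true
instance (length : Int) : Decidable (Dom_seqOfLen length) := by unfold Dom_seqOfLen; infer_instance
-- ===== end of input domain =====

-- B builds each sequential number directly from its starting digit instead of A's
-- repunit-addition while loop; objective: simpler.

-- ===== PORT A =====
-- the while loop: fuel 10 only makes it total; the loop body runs at most 9 times
-- (the last digit of num increases each step and the loop breaks at 9)
def seqOfLenLoop : Nat → String → Int → Int → List Int → List Int
  | 0, _, _, _, acc => acc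
  | fuel+1, num, length, diff, acc =>
    if (PySem.Str.len num) = length then
      let n := (PySem.Int.ofStr? num).getD 0          -- int(num): num is digits, never raises
      let acc' := acc ++ [n]
      if (PySem.Int.ofStr? (String.mk [(PySem.Str.pyGet? num (-1)).getD '0'])).getD 0 = 9 then
        acc'
      else
        seqOfLenLoop fuel (PySem.Int.toStr (n + diff)) length diff acc'
    else acc

def seqOfLen (length : Int) : List Int :=
  if length < 1 ∨ 10 < length then []
  else
    let num := (PySem.List.pyRange 1 (length + 1) 1).foldl
                 (fun s i => s ++ PySem.Int.toStr i) ""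
    let diff := (PySem.Int.ofStr? (String.mk (List.replicate length.toNat '1'))).getD 0
    seqOfLenLoop 10 num length diff []

-- ===== PORT B =====
def seqOfLen_alt (length : Int) : List Int :=
  if length < 1 then []
  else
    (PySem.List.pyRange 1 (11 - length) 1).map (fun start =>
      (PySem.Int.ofStr? ((PySem.List.pyRange start (start + length) 1).foldl
        (fun s d => s ++ PySem.Int.toStr d) "")).getD 0)

-- ===== PRECONDITION & SPEC =====
def Spec_seqOfLen (length : Int) (out : List Int) : Prop := out = seqOfLen_alt length
instance (length : Int) (out : List Int) : Decidable (Spec_seqOfLen length out) := by unfold Spec_seqOfLen; infer_instance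

-- ===== CLAIM (what is proved, stated in full; the proofs are below) =====
def Claim_equal_seqOfLen : Prop := ∀ (length : Int), Dom_seqOfLen length → Spec_seqOfLen length (seqOfLen length)

-- ===== LEMMAS AND PROOFS =====

-- ===== VERDICT (by name: the statement is the Claim_ definition above) =====
theorem seqOfLen_spec : Claim_equal_seqOfLen := by
  intro length _
  unfold Spec_seqOfLen
  rcases lt_or_ge length 1 with h1 | h1
  · simp [seqOfLen, seqOfLen_alt, h1]
  · rcases lt_or_ge (10 : Int) length with h2 | h2
    · have hA : seqOfLen length = [] := by
        simp [seqOfLen, h2]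
      have hB : seqOfLen_alt length = [] := by
        have hr : PySem.List.pyRange 1 (11 - length) 1 = [] := by
          rw [PySem.List.pyRange_one]
          have : (11 - length - 1).toNat = 0 := by omega
          simp [this]
        simp [seqOfLen_alt, hr]
      rw [hA, hB]
    · interval_cases length <;> decide
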